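-- pv_equiv track=rewrite | github.com/ChanMeng666/juejin-algorithm-practice | juejin1-10/juejin5.py | solution
-- ===== SOURCE A (Python) =====
-- def solution(n, max, array):
--     # 统计每个数字出现的次数
--     count_dict = {}
--     for num in array:
--         count_dict[num] = count_dict.get(num, 0) + 1
--
--     # 找出所有可能的三张牌组合
--     triples = []
--     for num, count in count_dict.items():
--         if count >= 3:
--             triples.append(num)
--
--     # 找出所有可能的对子组合
--     pairs = []
--     for num, count in count_dict.items():
--         if count >= 2:
--             pairs.append(num)
--
--     # 如果没有足够的牌组成葫芦，返回[0, 0]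
--     if not triples or not pairs:
--         return [0, 0]
--
--     # 对triples和pairs按照牌面大小排序（考虑1是最大的）
--     triples.sort(key=lambda x: (0 if x != 1 else 14, x), reverse=True)
--     pairs.sort(key=lambda x: (0 if x != 1 else 14, x), reverse=True)
--
--     # 找出最大的合法葫芦组合
--     result = [0, 0]
--     for triple in triples:
--         for pair in pairs:
--             # 跳过使用同一个数字的情况
--             if triple == pair:
--                 continue
--             # 计算牌面总和
--             total = triple * 3 + pair * 2
--             # 检查是否超过最大值
--             if total > max:
--                 continue
--             # 如果找到合法组合，直接返回（因为我们已经按照大小排序）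
--             return [triple, pair]
--
--     return [0, 0]
-- ===== SOURCE B (Python) =====
-- def solution(n, max, array):
--     # Count once; sort the non-1 pair values once; then for each triple find its
--     # best pair by binary search (1 handled as the special highest card) and keep
--     # the overall argmax under a scalar rank.  No nested scan over all pairs.
--     counts = {}
--     for num in array:
--         counts[num] = counts.get(num, 0) + 1
--     ps = sorted(p for p, c in counts.items() if c >= 2 and p != 1)
--     one_pair = counts.get(1, 0) >= 2
--     best = None  # (key, triple, pair)
--     for t, ct in counts.items():
--         if ct < 3:
--             continue
--         p = _best_pair(t, max, ps, one_pair)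
--         if p is None:
--             continue
--         k = _rank(t) * 4398046511104 + _rank(p)  # 2**42
--         if best is None or k > best[0]:
--             best = (k, t, p)
--     return [best[1], best[2]] if best is not None else [0, 0]
--
--
-- def _rank(x):
--     # 1 is the highest card; otherwise rank by face value.
--     return 1099511627776 if x == 1 else x  # 2**40
--
--
-- def _best_pair(t, mx, ps, one_pair):
--     # Highest-ranked pair value distinct from t with 3*t + 2*p <= mx.
--     if one_pair and t != 1 and 3 * t + 2 <= mx:
--         return 1
--     # ps is sorted ascending and excludes 1: best remaining pair is the largest
--     # p in ps with 2*p <= mx - 3*t and p != t; find the cut by binary search.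
--     lo, hi = 0, len(ps)
--     while lo < hi:
--         mid = (lo + hi) // 2
--         if 2 * ps[mid] <= mx - 3 * t:
--             lo = mid + 1
--         else:
--             hi = mid
--     if lo >= 1 and ps[lo - 1] != t:
--         return ps[lo - 1]
--     if lo >= 2:
--         return ps[lo - 2]
--     return None
-- ===== Notes on version B (the rewrite author's own statement) =====
-- stated objective: faster
-- what changed: A sorts triples and pairs with a tuple key and nested-scans all (triple, pair) combinations returning the first legal one; B sorts the non-1 pair values once and, for each triple, finds its best pair directly by binary search on the weight bound (with 1 as the special highest card), keeping the overall argmax under a scalar rank - the inner scan over all pairs disappears.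
import Mathlib
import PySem

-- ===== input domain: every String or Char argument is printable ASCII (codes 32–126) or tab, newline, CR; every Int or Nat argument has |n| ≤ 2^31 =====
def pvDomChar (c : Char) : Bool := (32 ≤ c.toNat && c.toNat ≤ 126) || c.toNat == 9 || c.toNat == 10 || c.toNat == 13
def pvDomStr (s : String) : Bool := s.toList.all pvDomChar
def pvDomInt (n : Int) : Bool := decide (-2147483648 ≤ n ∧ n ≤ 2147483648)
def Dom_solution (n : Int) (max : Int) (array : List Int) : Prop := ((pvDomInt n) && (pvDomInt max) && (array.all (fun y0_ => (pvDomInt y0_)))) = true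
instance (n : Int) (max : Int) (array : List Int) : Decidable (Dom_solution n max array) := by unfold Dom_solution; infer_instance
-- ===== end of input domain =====

-- B replaces A's two sorts plus early-return nested scan by a single argmax sweep
-- over the candidate combinations with a scalar rank (objective: alternative).

-- ===== PORT A =====
-- inner 'for pair in pairs' loop: returns at the first pair that is neither equal
-- to triple nor over the limit (the two 'continue's), else falls through (none)
def solutionInner (mx t : Int) : List Int → Option (List Int)
  | [] => none
  | p :: ps =>
    if t = p then solutionInner mx t ps
    else if t * 3 + p * 2 > mx then solutionInner mx t ps
    else some [t, p]

-- outer 'for triple in triples' loop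
def solutionLoop (mx : Int) (ps : List Int) : List Int → Option (List Int)
  | [] => none
  | t :: ts =>
    match solutionInner mx t ps with
    | some r => some r
    | none => solutionLoop mx ps ts

def solution (n : Int) (max : Int) (array : List Int) : List Int :=
  let countDict : PySem.Dict Int Int :=
    array.foldl (fun d num => d.insert num (d.getD num 0 + 1)) PySem.Dict.empty
  let triples := countDict.items.foldl
    (fun acc nc => if nc.2 ≥ 3 then acc ++ [nc.1] else acc) ([] : List Int)
  let pairs := countDict.items.foldl
    (fun acc nc => if nc.2 ≥ 2 then acc ++ [nc.1] else acc) ([] : List Int)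
  if triples = [] ∨ pairs = [] then [0, 0]
  else
    let triplesS := PySem.List.sorted2 triples (fun x => if x ≠ 1 then (0 : Int) else 14) (fun x => x) true
    let pairsS := PySem.List.sorted2 pairs (fun x => if x ≠ 1 then (0 : Int) else 14) (fun x => x) true
    match solutionLoop max pairsS triplesS with
    | some r => r
    | none => [0, 0]

-- ===== PORT B =====
-- _rank in Source B: 1 is the highest card, otherwise face value
def solutionAltRank (x : Int) : Int := if x = 1 then 1099511627776 else x

-- the 'while lo < hi' binary-search loop of _best_pair
-- (ps[mid] is always in range here: 0 <= lo <= mid < hi <= len(ps); getD is exact)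
def solutionAltBisect (t mxv : Int) (ps : List Int) (lo hi : Nat) : Nat :=
  if lo < hi then
    let mid := (lo + hi) / 2
    if 2 * ps.getD mid 0 ≤ mxv - 3 * t then solutionAltBisect t mxv ps (mid + 1) hi
    else solutionAltBisect t mxv ps lo mid
  else lo
termination_by hi - lo
decreasing_by all_goals omega

-- _best_pair in Source B (indices lo-1 / lo-2 are in range when the guards hold)
def solutionAltBestPair (t mxv : Int) (ps : List Int) (onePair : Bool) : Option Int :=
  if onePair = true ∧ t ≠ 1 ∧ 3 * t + 2 ≤ mxv then some 1
  else
    let lo := solutionAltBisect t mxv ps 0 ps.length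
    if 1 ≤ lo ∧ ps.getD (lo - 1) 0 ≠ t then some (ps.getD (lo - 1) 0)
    else if 2 ≤ lo then some (ps.getD (lo - 2) 0)
    else none

def solution_alt (n : Int) (max : Int) (array : List Int) : List Int :=
  let counts : PySem.Dict Int Int :=
    array.foldl (fun d num => d.insert num (d.getD num 0 + 1)) PySem.Dict.empty
  let ps := PySem.List.sorted
    ((counts.items.filter (fun pc => decide (pc.2 ≥ 2) && decide (pc.1 ≠ 1))).map (fun pc => pc.1))
    (fun x => x) false
  let onePair := decide (counts.getD 1 0 ≥ 2)
  let best := counts.items.foldl (fun best tc =>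
    if tc.2 < 3 then best
    else
      match solutionAltBestPair tc.1 max ps onePair with
      | none => best
      | some p =>
        let k := solutionAltRank tc.1 * 4398046511104 + solutionAltRank p
        match best with
        | none => some (k, tc.1, p)
        | some b => if k > b.1 then some (k, tc.1, p) else best) none
  match best with
  | some b => [b.2.1, b.2.2]
  | none => [0, 0]

-- ===== PRECONDITION & SPEC =====
def Spec_solution (n : Int) (max : Int) (array : List Int) (out : List Int) : Prop := out = solution_alt n max array
instance (n : Int) (max : Int) (array : List Int) (out : List Int) : Decidable (Spec_solution n max array out) := by unfold Spec_solution; infer_instance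

-- ===== CLAIM (what is proved, stated in full; the proofs are below) =====
def Claim_equal_solution : Prop := ∀ (n : Int) (max : Int) (array : List Int), Dom_solution n max array → Spec_solution n max array (solution n max array)

-- ===== LEMMAS AND PROOFS =====

def pvBnd (x : Int) : Prop := -2147483648 ≤ x ∧ x ≤ 2147483648

def pvBefore (a b : Int) : Bool :=
  (decide ((if b ≠ 1 then (0:Int) else 14) < (if a ≠ 1 then (0:Int) else 14)) ||
   (!decide ((if a ≠ 1 then (0:Int) else 14) < (if b ≠ 1 then (0:Int) else 14)) && decide ((fun x : Int => x) b < (fun x : Int => x) a)))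

lemma sorted2_rev_eq (l : List Int) :
    PySem.List.sorted2 l (fun x => if x ≠ 1 then (0 : Int) else 14) (fun x => x) true
    = l.foldl (fun acc x => PySem.List.insertBy pvBefore x acc) [] := rfl

lemma pvBefore_eq {a b : Int} (ha : pvBnd a) (hb : pvBnd b) :
    pvBefore a b = decide (solutionAltRank b < solutionAltRank a) := by
  obtain ⟨ha1, ha2⟩ := ha; obtain ⟨hb1, hb2⟩ := hb
  unfold pvBefore solutionAltRank
  by_cases h1 : a = 1 <;> by_cases h2 : b = 1 <;> simp [h1, h2] <;> omega

lemma insertBy_unfold_cons (before : Int → Int → Bool) (x y : Int) (ys : List Int) :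
    PySem.List.insertBy before x (y :: ys)
    = if before x y then x :: y :: ys else y :: PySem.List.insertBy before x ys := by
  simp [PySem.List.insertBy]

lemma rank_inj {a b : Int} (ha : pvBnd a) (hb : pvBnd b)
    (h : solutionAltRank a = solutionAltRank b) : a = b := by
  unfold solutionAltRank at h
  obtain ⟨ha1, ha2⟩ := ha; obtain ⟨hb1, hb2⟩ := hb
  split at h <;> split at h <;> omega

lemma insertBy_pairwise_le (x : Int) (acc : List Int)
    (hbx : ∀ y ∈ acc, pvBefore x y = decide (solutionAltRank y < solutionAltRank x))
    (hacc : acc.Pairwise (fun a b => solutionAltRank b ≤ solutionAltRank a)) :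
    (PySem.List.insertBy pvBefore x acc).Pairwise (fun a b => solutionAltRank b ≤ solutionAltRank a) := by
  induction acc with
  | nil => simp [PySem.List.insertBy]
  | cons y ys ih =>
    rw [insertBy_unfold_cons]
    rw [List.pairwise_cons] at hacc
    obtain ⟨hy, hys⟩ := hacc
    have hbxy := hbx y (by simp)
    by_cases hc : pvBefore x y = true
    · simp only [hc, if_true]
      have hlt : solutionAltRank y < solutionAltRank x := by
        rw [hbxy] at hc; exact of_decide_eq_true hc
      constructor
      · intro z hz
        rcases List.mem_cons.mp hz with rfl | hz
        · omega
        · have := hy z hz; omega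
      · exact List.Pairwise.cons hy hys
    · simp only [hc]
      have hle : solutionAltRank x ≤ solutionAltRank y := by
        rw [hbxy] at hc
        have := of_decide_eq_false (Bool.not_eq_true _ ▸ hc)
        omega
      constructor
      · intro z hz
        rcases (PySem.List.mem_insertBy _ _ _ _).mp hz with rfl | hz
        · exact hle
        · exact hy z hz
      · exact ih (fun z hz => hbx z (by simp [hz])) hys

lemma foldl_insertBy_pairwise (l : List Int) :
    ∀ acc : List Int, (∀ y ∈ l, pvBnd y) → (∀ y ∈ acc, pvBnd y) →
    acc.Pairwise (fun a b => solutionAltRank b ≤ solutionAltRank a) →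
    ((l.foldl (fun acc x => PySem.List.insertBy pvBefore x acc) acc).Pairwise
      (fun a b => solutionAltRank b ≤ solutionAltRank a)
     ∧ ∀ y ∈ l.foldl (fun acc x => PySem.List.insertBy pvBefore x acc) acc, pvBnd y) := by
  induction l with
  | nil => intro acc _ hacc hp; exact ⟨hp, hacc⟩
  | cons x xs ih =>
    intro acc hl hacc hp
    have hx : pvBnd x := hl x (by simp)
    have hacc' : ∀ y ∈ PySem.List.insertBy pvBefore x acc, pvBnd y := by
      intro y hy
      rcases (PySem.List.mem_insertBy _ _ _ _).mp hy with rfl | hy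
      · exact hx
      · exact hacc y hy
    have hp' := insertBy_pairwise_le x acc (fun y hy => pvBefore_eq hx (hacc y hy)) hp
    simpa using ih (PySem.List.insertBy pvBefore x acc) (fun y hy => hl y (by simp [hy])) hacc' hp'

lemma pairwise_strict_of_le (l : List Int) (hnd : l.Nodup) (hb : ∀ x ∈ l, pvBnd x)
    (h : l.Pairwise (fun a b => solutionAltRank b ≤ solutionAltRank a)) :
    l.Pairwise (fun a b => solutionAltRank b < solutionAltRank a) := by
  induction l with
  | nil => exact List.Pairwise.nil
  | cons x xs ih =>
    rw [List.pairwise_cons] at h ⊢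
    rw [List.nodup_cons] at hnd
    refine ⟨fun y hy => ?_, ih hnd.2 (fun z hz => hb z (by simp [hz])) h.2⟩
    have hle := h.1 y hy
    have hne : x ≠ y := fun he => hnd.1 (he ▸ hy)
    have : solutionAltRank y ≠ solutionAltRank x :=
      fun he => hne (rank_inj (hb x (by simp)) (hb y (by simp [hy])) he.symm)
    omega

-- ===== A search characterization =====
def pvK (t p : Int) : Int := solutionAltRank t * 4398046511104 + solutionAltRank p

lemma rank_bounds {x : Int} (h : pvBnd x) :
    -2147483648 ≤ solutionAltRank x ∧ solutionAltRank x ≤ 1099511627776 := by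
  unfold solutionAltRank; obtain ⟨h1, h2⟩ := h; split <;> omega

lemma innerA_none (mx t : Int) (ps : List Int) :
    solutionInner mx t ps = none ↔ ∀ p ∈ ps, t = p ∨ t * 3 + p * 2 > mx := by
  induction ps with
  | nil => simp [solutionInner]
  | cons p ps ih =>
    simp only [solutionInner]
    split_ifs with h1 h2
    · rw [ih]; constructor
      · intro h q hq; rcases List.mem_cons.mp hq with rfl | hq
        · exact Or.inl h1
        · exact h q hq
      · intro h q hq; exact h q (by simp [hq])
    · rw [ih]; constructor
      · intro h q hq; rcases List.mem_cons.mp hq with rfl | hq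
        · exact Or.inr h2
        · exact h q hq
      · intro h q hq; exact h q (by simp [hq])
    · simp only [false_iff]
      intro h
      rcases h p (by simp) with he | hgt
      · exact h1 he
      · exact h2 hgt

lemma innerA_some (mx t : Int) (ps : List Int) (r : List Int)
    (hps : ps.Pairwise (fun a b => solutionAltRank b < solutionAltRank a))
    (h : solutionInner mx t ps = some r) :
    ∃ p, r = [t, p] ∧ p ∈ ps ∧ t ≠ p ∧ t * 3 + p * 2 ≤ mx ∧
      ∀ q ∈ ps, t ≠ q → t * 3 + q * 2 ≤ mx → solutionAltRank q ≤ solutionAltRank p := by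
  induction ps with
  | nil => simp [solutionInner] at h
  | cons p ps ih =>
    rw [List.pairwise_cons] at hps
    simp only [solutionInner] at h
    split_ifs at h with h1 h2
    · obtain ⟨p', hr, hmem, hne, hle, hmax⟩ := ih hps.2 h
      refine ⟨p', hr, by simp [hmem], hne, hle, ?_⟩
      intro q hq hne' hle'
      rcases List.mem_cons.mp hq with rfl | hq
      · exact absurd rfl (h1 ▸ hne')
      · exact hmax q hq hne' hle'
    · obtain ⟨p', hr, hmem, hne, hle, hmax⟩ := ih hps.2 h
      refine ⟨p', hr, by simp [hmem], hne, hle, ?_⟩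
      intro q hq hne' hle'
      rcases List.mem_cons.mp hq with rfl | hq
      · omega
      · exact hmax q hq hne' hle'
    · refine ⟨p, by simpa using h.symm, by simp, h1, by omega, ?_⟩
      intro q hq _ _
      rcases List.mem_cons.mp hq with rfl | hq
      · exact le_refl _
      · exact le_of_lt (hps.1 q hq)

lemma pvK_mono {t t' p p' : Int} (ht : pvBnd t) (hp : pvBnd p) (ht' : pvBnd t') (hp' : pvBnd p')
    (h : solutionAltRank t' < solutionAltRank t) : pvK t' p' ≤ pvK t p := by
  have b1 := rank_bounds ht; have b2 := rank_bounds hp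
  have b3 := rank_bounds ht'; have b4 := rank_bounds hp'
  unfold pvK; omega

lemma loopA_none (mx : Int) (ps ts : List Int) :
    solutionLoop mx ps ts = none ↔ ∀ t ∈ ts, ∀ p ∈ ps, t = p ∨ t * 3 + p * 2 > mx := by
  induction ts with
  | nil => simp [solutionLoop]
  | cons t ts ih =>
    simp only [solutionLoop]
    cases hin : solutionInner mx t ps with
    | some r =>
      refine iff_of_false (by simp) ?_
      intro h
      have hnone := (innerA_none mx t ps).mpr (fun p hp => h t (by simp) p hp)
      rw [hnone] at hin
      exact absurd hin (by simp)
    | none =>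
      rw [ih]
      constructor
      · intro h t' ht'
        rcases List.mem_cons.mp ht' with rfl | ht'
        · exact (innerA_none mx t' ps).mp hin
        · exact h t' ht'
      · intro h t' ht'; exact h t' (by simp [ht'])

lemma loopA_some (mx : Int) (ps : List Int) (ts : List Int) (r : List Int)
    (hts : ts.Pairwise (fun a b => solutionAltRank b < solutionAltRank a))
    (hps : ps.Pairwise (fun a b => solutionAltRank b < solutionAltRank a))
    (hbts : ∀ x ∈ ts, pvBnd x) (hbps : ∀ x ∈ ps, pvBnd x)
    (h : solutionLoop mx ps ts = some r) :
    ∃ t p, r = [t, p] ∧ t ∈ ts ∧ p ∈ ps ∧ t ≠ p ∧ t * 3 + p * 2 ≤ mx ∧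
      ∀ t' ∈ ts, ∀ p' ∈ ps, t' ≠ p' → t' * 3 + p' * 2 ≤ mx → pvK t' p' ≤ pvK t p := by
  induction ts with
  | nil => simp [solutionLoop] at h
  | cons t ts ih =>
    rw [List.pairwise_cons] at hts
    simp only [solutionLoop] at h
    cases hin : solutionInner mx t ps with
    | some r' =>
      rw [hin] at h
      obtain ⟨p, hr, hmem, hne, hle, hmax⟩ := innerA_some mx t ps r' hps hin
      refine ⟨t, p, by simpa [hr] using h.symm, by simp, hmem, hne, hle, ?_⟩
      intro t' ht' p' hp' hne' hle'
      rcases List.mem_cons.mp ht' with rfl | ht'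
      · have := hmax p' hp' hne' hle'
        unfold pvK; omega
      · exact pvK_mono (hbts t (by simp)) (hbps p hmem)
          (hbts t' (by simp [ht'])) (hbps p' hp') (hts.1 t' ht')
    | none =>
      rw [hin] at h
      obtain ⟨t0, p0, hr, htm, hpm, hne, hle, hmax⟩ :=
        ih hts.2 (fun x hx => hbts x (by simp [hx])) h
      refine ⟨t0, p0, hr, by simp [htm], hpm, hne, hle, ?_⟩
      intro t' ht' p' hp' hne' hle'
      rcases List.mem_cons.mp ht' with rfl | ht'
      · exact absurd hle' (by have := ((innerA_none mx t' ps).mp hin) p' hp'; omega)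
      · exact hmax t' ht' p' hp' hne' hle'

-- ===== B argmax characterization =====
def pvGood (C : Int → Int → Prop) (b : Option (Int × Int × Int)) : Prop :=
  (b = none ∧ ∀ t p, ¬ C t p) ∨
  (∃ t p, b = some (pvK t p, t, p) ∧ C t p ∧ ∀ t' p', C t' p' → pvK t' p' ≤ pvK t p)

lemma pvGood_congr {C C' : Int → Int → Prop} {b : Option (Int × Int × Int)}
    (h : ∀ t p, C t p ↔ C' t p) (hg : pvGood C b) : pvGood C' b := by
  rcases hg with ⟨hb, hn⟩ | ⟨t, p, hb, hc, hmax⟩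
  · exact Or.inl ⟨hb, fun t p hc => hn t p ((h t p).mpr hc)⟩
  · exact Or.inr ⟨t, p, hb, (h t p).mp hc, fun t' p' hc' => hmax t' p' ((h t' p').mpr hc')⟩

lemma getD_mono_of_pairwise_le {l : List Int} (h : l.Pairwise (· ≤ ·)) {i j : Nat}
    (hij : i ≤ j) (hj : j < l.length) : l.getD i 0 ≤ l.getD j 0 := by
  rcases Nat.lt_or_ge i j with hlt | hge
  · rw [List.getD_eq_getElem l 0 (by omega), List.getD_eq_getElem l 0 hj]
    exact List.pairwise_iff_getElem.mp h i j (by omega) hj hlt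
  · have : i = j := by omega
    subst this; exact le_refl _

lemma bisect_spec (t mxv : Int) (ps : List Int) (hsort : ps.Pairwise (· ≤ ·)) :
    ∀ (lo hi : Nat), lo ≤ hi → hi ≤ ps.length →
    (∀ i : Nat, i < lo → 2 * ps.getD i 0 ≤ mxv - 3 * t) →
    (∀ i : Nat, hi ≤ i → i < ps.length → ¬(2 * ps.getD i 0 ≤ mxv - 3 * t)) →
    (lo ≤ solutionAltBisect t mxv ps lo hi ∧ solutionAltBisect t mxv ps lo hi ≤ hi ∧
     (∀ i : Nat, i < solutionAltBisect t mxv ps lo hi → 2 * ps.getD i 0 ≤ mxv - 3 * t) ∧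
     (∀ i : Nat, solutionAltBisect t mxv ps lo hi ≤ i → i < ps.length →
        ¬(2 * ps.getD i 0 ≤ mxv - 3 * t))) := by
  intro lo hi
  fun_induction solutionAltBisect t mxv ps lo hi with
  | case1 lo hi hlt mid hcond ih =>
    intro hlh hhl hpre hpost
    have hmid : mid < hi := by omega
    have hres := ih (by omega) hhl
      (fun i hi2 => by
        rcases Nat.lt_or_ge i lo with h1 | h1
        · exact hpre i h1
        · exact le_trans (by
            have := getD_mono_of_pairwise_le hsort (i := i) (j := mid) (by omega) (by omega)
            omega) hcond)
      hpost
    exact ⟨le_trans (by omega : lo ≤ mid + 1) hres.1, hres.2.1, hres.2.2⟩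
  | case2 lo hi hlt mid hcond ih =>
    intro hlh hhl hpre hpost
    have hres := ih (by omega) (by omega) hpre
      (fun i hi2 hilen => by
        rcases Nat.lt_or_ge i hi with h1 | h1
        · intro hc
          have := getD_mono_of_pairwise_le hsort (i := mid) (j := i) (by omega) hilen
          omega
        · exact hpost i h1 hilen)
    exact ⟨le_trans (le_refl _) hres.1, le_trans hres.2.1 (by omega), hres.2.2⟩
  | case3 lo hi hlt =>
    intro hlh hhl hpre hpost
    have : lo = hi := by omega
    subst this
    exact ⟨le_refl _, le_refl _, hpre, hpost⟩

lemma pairwise_lt_of_le_nodup (l : List Int) (hnd : l.Nodup) (h : l.Pairwise (· ≤ ·)) :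
    l.Pairwise (· < ·) := by
  induction l with
  | nil => exact List.Pairwise.nil
  | cons x xs ih =>
    rw [List.pairwise_cons] at h ⊢
    rw [List.nodup_cons] at hnd
    refine ⟨fun y hy => ?_, ih hnd.2 h.2⟩
    exact lt_of_le_of_ne (h.1 y hy) (fun he => hnd.1 (he ▸ hy))

lemma bestPair_spec (t mxv : Int) (ps : List Int) (onePair : Bool) (P : List Int)
    (hsort : ps.Pairwise (· < ·))
    (hmem : ∀ x : Int, x ∈ ps ↔ x ∈ P ∧ x ≠ 1)
    (hone : onePair = true ↔ 1 ∈ P)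
    (hbnd : ∀ x ∈ P, pvBnd x) :
    (solutionAltBestPair t mxv ps onePair = none →
      ∀ p ∈ P, p ≠ t → ¬(3 * t + 2 * p ≤ mxv)) ∧
    (∀ p : Int, solutionAltBestPair t mxv ps onePair = some p →
      p ∈ P ∧ p ≠ t ∧ 3 * t + 2 * p ≤ mxv ∧
      ∀ q ∈ P, q ≠ t → 3 * t + 2 * q ≤ mxv → solutionAltRank q ≤ solutionAltRank p) := by
  have hsle : ps.Pairwise (· ≤ ·) := hsort.imp (fun h => le_of_lt h)
  simp only [solutionAltBestPair]
  by_cases hsp : onePair = true ∧ t ≠ 1 ∧ 3 * t + 2 ≤ mxv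
  · rw [if_pos hsp]
    refine ⟨fun h => absurd h (by simp), fun p hp => ?_⟩
    have hp' : (1 : Int) = p := by injection hp
    subst hp'
    refine ⟨hone.mp hsp.1, fun he => hsp.2.1 he.symm, by omega, ?_⟩
    intro q hq hqt hql
    by_cases hq1 : q = 1
    · subst hq1; exact le_refl _
    · have := (hbnd q hq).2
      unfold solutionAltRank
      rw [if_neg hq1, if_pos rfl]
      omega
  · rw [if_neg hsp]
    have hspec := bisect_spec t mxv ps hsle 0 ps.length (by omega) (le_refl _)
      (fun i hi => absurd hi (Nat.not_lt_zero i))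
      (fun i h1 h2 => absurd h2 (by omega))
    set lo := solutionAltBisect t mxv ps 0 ps.length with hlodef
    obtain ⟨h0lo, hlole, hbelow, habove⟩ := hspec
    -- every valid pair value is a non-1 member of ps whose index is below lo
    have hvalid : ∀ q ∈ P, q ≠ t → 3 * t + 2 * q ≤ mxv →
        ∃ j : Nat, j < lo ∧ ps.getD j 0 = q := by
      intro q hq hqt hql
      have hq1 : q ≠ 1 := by
        intro he
        exact hsp ⟨hone.mpr (he ▸ hq), fun ht1 => hqt (he.trans ht1.symm), by omega⟩
      have hqps : q ∈ ps := (hmem q).mpr ⟨hq, hq1⟩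
      obtain ⟨j, hjlen, hjq⟩ := List.mem_iff_getElem.mp hqps
      have hjd : ps.getD j 0 = q := by rw [List.getD_eq_getElem ps 0 hjlen]; exact hjq
      refine ⟨j, ?_, hjd⟩
      by_contra hge
      exact habove j (by omega) hjlen (by rw [hjd]; omega)
    -- members of ps below the cut are valid-sum values
    have hmemD : ∀ j : Nat, j < lo → ps.getD j 0 ∈ P ∧ ps.getD j 0 ≠ 1 := by
      intro j hj
      have hjlen : j < ps.length := by omega
      have : ps.getD j 0 ∈ ps := by
        rw [List.getD_eq_getElem ps 0 hjlen]; exact List.getElem_mem hjlen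
      exact (hmem _).mp this
    have hrank_le : ∀ (q : Int) (j : Nat), j < lo → q ≠ 1 → ps.getD j 0 ≠ 1 →
        q ≤ ps.getD j 0 → solutionAltRank q ≤ solutionAltRank (ps.getD j 0) := by
      intro q j hj hq1 hp1 hle
      unfold solutionAltRank
      rw [if_neg hq1, if_neg hp1]
      exact hle
    split_ifs with c1 c2
    · -- best is ps[lo-1]
      obtain ⟨h1lo, hnet⟩ := c1
      obtain ⟨hpP, hp1⟩ := hmemD (lo - 1) (by omega)
      refine ⟨fun h => absurd h (by simp), fun p hp => ?_⟩
      have hp' : ps.getD (lo - 1) 0 = p := by injection hp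
      subst hp'
      refine ⟨hpP, hnet, by have := hbelow (lo - 1) (by omega); omega, ?_⟩
      intro q hq hqt hql
      obtain ⟨j, hjlo, hjq⟩ := hvalid q hq hqt hql
      have hq1 : (ps.getD j 0) ≠ 1 := (hmemD j hjlo).2
      refine hrank_le q (lo - 1) (by omega) (hjq ▸ hq1) hp1 ?_
      rw [← hjq]
      exact getD_mono_of_pairwise_le hsle (by omega) (by omega)
    · -- ps[lo-1] = t, best is ps[lo-2]
      have hteq : ps.getD (lo - 1) 0 = t := by
        rcases not_and_or.mp c1 with h | h
        · omega
        · exact not_not.mp h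
      obtain ⟨hpP, hp1⟩ := hmemD (lo - 2) (by omega)
      refine ⟨fun h => absurd h (by simp), fun p hp => ?_⟩
      have hp' : ps.getD (lo - 2) 0 = p := by injection hp
      subst hp'
      have hlt : ps.getD (lo - 2) 0 < ps.getD (lo - 1) 0 := by
        rw [List.getD_eq_getElem ps 0 (by omega), List.getD_eq_getElem ps 0 (by omega)]
        exact List.pairwise_iff_getElem.mp hsort (lo - 2) (lo - 1) (by omega) (by omega) (by omega)
      refine ⟨hpP, by omega, by have := hbelow (lo - 2) (by omega); omega, ?_⟩
      intro q hq hqt hql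
      obtain ⟨j, hjlo, hjq⟩ := hvalid q hq hqt hql
      have hjne : j ≠ lo - 1 := by
        intro he
        exact hqt (by rw [← hjq, he, hteq])
      have hq1 : (ps.getD j 0) ≠ 1 := (hmemD j hjlo).2
      refine hrank_le q (lo - 2) (by omega) (hjq ▸ hq1) hp1 ?_
      rw [← hjq]
      exact getD_mono_of_pairwise_le hsle (by omega) (by omega)
    · -- no pair available
      refine ⟨fun _ => ?_, fun p hp => by cases hp⟩
      intro q hq hqt hql
      obtain ⟨j, hjlo, hjq⟩ := hvalid q hq hqt hql
      rcases Nat.lt_or_ge lo 2 with h2 | h2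
      · have hlo1 : lo = 1 := by omega
        have hj0 : j = 0 := by omega
        have hteq : ps.getD (lo - 1) 0 = t := by
          rcases not_and_or.mp c1 with h | h
          · omega
          · exact not_not.mp h
        exact hqt (by rw [← hjq, hj0, show (0 : Nat) = lo - 1 from by omega, hteq])
      · exact c2 h2

def pvStepB (mxv : Int) (ps : List Int) (onePair : Bool) (best : Option (Int × Int × Int))
    (tc : Int × Int) : Option (Int × Int × Int) :=
  if tc.2 < 3 then best
  else
    match solutionAltBestPair tc.1 mxv ps onePair with
    | none => best
    | some p =>
      let k := solutionAltRank tc.1 * 4398046511104 + solutionAltRank p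
      match best with
      | none => some (k, tc.1, p)
      | some b => if k > b.1 then some (k, tc.1, p) else best

lemma pvStepB_some (mxv : Int) (ps : List Int) (onePair : Bool) (b : Option (Int × Int × Int))
    (tc : Int × Int) (p : Int) (h3 : ¬ tc.2 < 3)
    (hc : solutionAltBestPair tc.1 mxv ps onePair = some p) :
    pvStepB mxv ps onePair b tc =
      (match b with
       | none => some (solutionAltRank tc.1 * 4398046511104 + solutionAltRank p, tc.1, p)
       | some bb => if solutionAltRank tc.1 * 4398046511104 + solutionAltRank p > bb.1
                    then some (solutionAltRank tc.1 * 4398046511104 + solutionAltRank p, tc.1, p)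
                    else b) := by
  unfold pvStepB; rw [if_neg h3, hc]

lemma B_outer (mxv : Int) (ps : List Int) (onePair : Bool) (P : List Int)
    (hsort : ps.Pairwise (· < ·))
    (hmem : ∀ x : Int, x ∈ ps ↔ x ∈ P ∧ x ≠ 1)
    (hone : onePair = true ↔ 1 ∈ P)
    (hbnd : ∀ x ∈ P, pvBnd x)
    (l : List (Int × Int)) :
    ∀ (b : Option (Int × Int × Int)) (C : Int → Int → Prop), pvGood C b →
    pvGood (fun t p => C t p ∨ (∃ ct : Int, (t, ct) ∈ l ∧ ¬(ct < 3) ∧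
        p ∈ P ∧ p ≠ t ∧ 3 * t + 2 * p ≤ mxv))
      (l.foldl (pvStepB mxv ps onePair) b) := by
  induction l with
  | nil =>
    intro b C hg
    simpa using pvGood_congr (by simp) hg
  | cons tc l ih =>
    intro b C hg
    simp only [List.foldl_cons]
    by_cases h3 : tc.2 < 3
    · rw [show pvStepB mxv ps onePair b tc = b from by unfold pvStepB; rw [if_pos h3]]
      refine pvGood_congr ?_ (ih b C hg)
      intro t p
      constructor
      · rintro (h | ⟨ct, hm, hv, rest⟩)
        · exact Or.inl h
        · exact Or.inr ⟨ct, by simp [hm], hv, rest⟩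
      · rintro (h | ⟨ct, hm, hv, rest⟩)
        · exact Or.inl h
        · rcases List.mem_cons.mp hm with he | hm
          · exact absurd h3 (by rw [← Prod.mk.eta (p := tc), ← he]; exact hv)
          · exact Or.inr ⟨ct, hm, hv, rest⟩
    · have hbp := bestPair_spec tc.1 mxv ps onePair P hsort hmem hone hbnd
      cases hcase : solutionAltBestPair tc.1 mxv ps onePair with
      | none =>
        rw [show pvStepB mxv ps onePair b tc = b from by
          unfold pvStepB; rw [if_neg h3, hcase]]
        have hno := hbp.1 hcase
        refine pvGood_congr ?_ (ih b C hg)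
        intro t p
        constructor
        · rintro (h | ⟨ct, hm, hv, rest⟩)
          · exact Or.inl h
          · exact Or.inr ⟨ct, by simp [hm], hv, rest⟩
        · rintro (h | ⟨ct, hm, hv, rest⟩)
          · exact Or.inl h
          · rcases List.mem_cons.mp hm with he | hm
            · exfalso
              have ht : t = tc.1 := congrArg Prod.fst he
              exact hno p rest.1 (ht ▸ rest.2.1) (ht ▸ rest.2.2)
            · exact Or.inr ⟨ct, hm, hv, rest⟩
      | some p =>
        obtain ⟨hpP, hpt, hpl, hpmax⟩ := hbp.2 p hcase
        have heq := pvStepB_some mxv ps onePair b tc p h3 hcase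
        have hstep : pvGood (fun t' p' => C t' p' ∨
            (t' = tc.1 ∧ p' ∈ P ∧ p' ≠ tc.1 ∧ 3 * tc.1 + 2 * p' ≤ mxv))
            (pvStepB mxv ps onePair b tc) := by
          rw [heq]
          rcases hg with ⟨rfl, hn⟩ | ⟨t0, p0, rfl, hc0, hmax0⟩
          · refine Or.inr ⟨tc.1, p, rfl, Or.inr ⟨rfl, hpP, hpt, hpl⟩, ?_⟩
            rintro t' p' (h | ⟨rfl, hP', hne', hle'⟩)
            · exact absurd h (hn t' p')
            · have := hpmax p' hP' hne' hle'
              unfold pvK; omega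
          · simp only []
            by_cases hk : solutionAltRank tc.1 * 4398046511104 + solutionAltRank p > pvK t0 p0
            · rw [if_pos hk]
              refine Or.inr ⟨tc.1, p, rfl, Or.inr ⟨rfl, hpP, hpt, hpl⟩, ?_⟩
              rintro t' p' (h | ⟨rfl, hP', hne', hle'⟩)
              · exact le_trans (hmax0 t' p' h) (le_of_lt hk)
              · have := hpmax p' hP' hne' hle'
                unfold pvK; omega
            · rw [if_neg hk]
              refine Or.inr ⟨t0, p0, rfl, Or.inl hc0, ?_⟩
              rintro t' p' (h | ⟨rfl, hP', hne', hle'⟩)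
              · exact hmax0 t' p' h
              · have := hpmax p' hP' hne' hle'
                unfold pvK at hk ⊢; omega
        refine pvGood_congr ?_ (ih _ _ hstep)
        intro t' p'
        constructor
        · rintro ((h | ⟨rfl, hP', hne', hle'⟩) | ⟨ct, hm, hv, rest⟩)
          · exact Or.inl h
          · exact Or.inr ⟨tc.2, by simp [Prod.mk.eta], h3, hP', hne', hle'⟩
          · exact Or.inr ⟨ct, by simp [hm], hv, rest⟩
        · rintro (h | ⟨ct, hm, hv, rest⟩)
          · exact Or.inl (Or.inl h)
          · rcases List.mem_cons.mp hm with he | hm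
            · have ht : t' = tc.1 := congrArg Prod.fst he
              exact Or.inl (Or.inr ⟨ht, rest.1, ht ▸ rest.2.1, ht ▸ rest.2.2⟩)
            · exact Or.inr ⟨ct, hm, hv, rest⟩

lemma pvK_inj {t p t' p' : Int} (ht : pvBnd t) (hp : pvBnd p) (ht' : pvBnd t') (hp' : pvBnd p')
    (h : pvK t p = pvK t' p') : t = t' ∧ p = p' := by
  have b1 := rank_bounds ht; have b2 := rank_bounds hp
  have b3 := rank_bounds ht'; have b4 := rank_bounds hp'
  unfold pvK at h
  have hr1 : solutionAltRank t = solutionAltRank t' := by omega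
  have hr2 : solutionAltRank p = solutionAltRank p' := by omega
  exact ⟨rank_inj ht ht' hr1, rank_inj hp hp' hr2⟩

-- ===== VERDICT (by name: the statement is the Claim_ definition above) =====
theorem solution_spec : Claim_equal_solution := by
  intro n mx array hdom
  unfold Spec_solution
  have hbArr : ∀ x ∈ array, pvBnd x := by
    unfold Dom_solution at hdom
    simp only [Bool.and_eq_true, List.all_eq_true, pvDomInt, decide_eq_true_eq] at hdom
    intro x hx
    exact hdom.2 x hx
  have hitems : (array.foldl (fun d num => d.insert num (d.getD num 0 + 1)) PySem.Dict.empty).items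
      = (PySem.Set.ofList array).map (fun k => (k, (array.count k : Int))) := by
    rw [PySem.Dict.foldl_insert_getD_add_one_eq_counter, PySem.Dict.items_counter]
  have hTrip : (((PySem.Set.ofList array).map (fun k => (k, (array.count k : Int)))).foldl
      (fun acc nc => if nc.2 ≥ 3 then acc ++ [nc.1] else acc) ([] : List Int))
      = (PySem.Set.ofList array).filter (fun k => decide ((array.count k : Int) ≥ 3)) := by
    rw [PySem.List.foldl_append_ite (p := fun nc : Int × Int => nc.2 ≥ 3) (f := fun nc : Int × Int => nc.1)]
    simp [List.filter_map, List.map_map, Function.comp_def]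
  have hPair : (((PySem.Set.ofList array).map (fun k => (k, (array.count k : Int)))).foldl
      (fun acc nc => if nc.2 ≥ 2 then acc ++ [nc.1] else acc) ([] : List Int))
      = (PySem.Set.ofList array).filter (fun k => decide ((array.count k : Int) ≥ 2)) := by
    rw [PySem.List.foldl_append_ite (p := fun nc : Int × Int => nc.2 ≥ 2) (f := fun nc : Int × Int => nc.1)]
    simp [List.filter_map, List.map_map, Function.comp_def]
  have hcnt1 : (array.foldl (fun d num => d.insert num (d.getD num 0 + 1)) PySem.Dict.empty).getD 1 0
      = (array.count 1 : Int) := by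
    rw [PySem.Dict.foldl_insert_getD_add_one_eq_counter, PySem.Dict.getD_counter]
  have hPS1 : ((((PySem.Set.ofList array).map (fun k => (k, (array.count k : Int)))).filter
        (fun pc => decide (pc.2 ≥ 2) && decide (pc.1 ≠ 1))).map (fun pc => pc.1))
      = (PySem.Set.ofList array).filter (fun k => decide ((array.count k : Int) ≥ 2) && decide (k ≠ 1)) := by
    simp [List.filter_map, List.map_map, Function.comp_def]
  simp only [solution, solution_alt, hitems, hcnt1, hTrip, hPair, hPS1]
  set S := PySem.Set.ofList array with hSdef
  set ITEMS := List.map (fun k => (k, (↑(List.count k array) : Int))) S with hIdef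
  set T := List.filter (fun k => decide ((↑(List.count k array) : Int) ≥ 3)) S with hTdef
  set P := List.filter (fun k => decide ((↑(List.count k array) : Int) ≥ 2)) S with hPdef
  set P1 := List.filter (fun k => decide ((↑(List.count k array) : Int) ≥ 2) && decide (k ≠ 1)) S with hP1def
  set PS := PySem.List.sorted P1 (fun x => x) false with hPSdef
  set ONEP := decide ((↑(List.count 1 array) : Int) ≥ 2) with hONEPdef
  show _ = (match ITEMS.foldl (pvStepB mx PS ONEP) none with
    | some b => [b.2.1, b.2.2]
    | none => [0, 0])
  -- memberships
  have hSmem : ∀ x, x ∈ S → pvBnd x := fun x hx => hbArr x ((PySem.Set.mem_ofList array x).mp hx)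
  have hmemI : ∀ t ct : Int, ((t, ct) ∈ ITEMS ↔ t ∈ S ∧ ct = (List.count t array : Int)) := by
    intro t ct
    rw [hIdef, List.mem_map]
    constructor
    · rintro ⟨a, ha, heq⟩
      obtain ⟨h1, h2⟩ := Prod.mk.injEq .. ▸ heq
      exact ⟨h1 ▸ ha, h1 ▸ h2.symm⟩
    · rintro ⟨h1, rfl⟩
      exact ⟨t, h1, rfl⟩
  have hmemT : ∀ x : Int, (x ∈ T ↔ x ∈ S ∧ 3 ≤ (List.count x array : Int)) := by
    intro x; rw [hTdef, List.mem_filter]; simp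
  have hmemP : ∀ x : Int, (x ∈ P ↔ x ∈ S ∧ 2 ≤ (List.count x array : Int)) := by
    intro x; rw [hPdef, List.mem_filter]; simp
  -- B characterization
  have hP1nd : P1.Nodup := List.Nodup.filter _ (PySem.Set.nodup_ofList array)
  have hPSperm : PS.Perm P1 := PySem.List.sorted_perm P1 (fun x : Int => x) false
  have hPSle : PS.Pairwise (· ≤ ·) := by
    have := PySem.List.sorted_pairwise P1 (fun x : Int => x)
    rw [← hPSdef] at this
    exact this
  have hPSlt : PS.Pairwise (· < ·) :=
    pairwise_lt_of_le_nodup PS (hPSperm.nodup_iff.mpr hP1nd) hPSle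
  have hmemPS : ∀ x : Int, (x ∈ PS ↔ x ∈ P ∧ x ≠ 1) := by
    intro x
    rw [hPSperm.mem_iff, hP1def, List.mem_filter, hmemP]
    simp only [Bool.and_eq_true, decide_eq_true_eq]
    constructor
    · rintro ⟨h1, h2, h3⟩; exact ⟨⟨h1, h2⟩, h3⟩
    · rintro ⟨⟨h1, h2⟩, h3⟩; exact ⟨h1, h2, h3⟩
  have hPbnd : ∀ x ∈ P, pvBnd x := fun x hx => hSmem x ((hmemP x).mp hx).1
  have hone : ONEP = true ↔ 1 ∈ P := by
    rw [hONEPdef, decide_eq_true_eq, hmemP]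
    constructor
    · intro h
      refine ⟨(PySem.Set.mem_ofList array 1).mpr ?_, h⟩
      have : 0 < List.count 1 array := by omega
      exact List.count_pos_iff.mp this
    · exact fun h => h.2
  have hgood0 : pvGood (fun _ _ => False) (none : Option (Int × Int × Int)) := Or.inl ⟨rfl, by simp⟩
  have hgood := B_outer mx PS ONEP P hPSlt hmemPS hone hPbnd ITEMS none _ hgood0
  have hCB : pvGood (fun t p => t ∈ T ∧ p ∈ P ∧ p ≠ t ∧ 3 * t + 2 * p ≤ mx)
      (ITEMS.foldl (pvStepB mx PS ONEP) none) := by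
    refine pvGood_congr ?_ hgood
    intro t p
    constructor
    · rintro (hF | ⟨ct, hmt, h3, hpP, hpt, hle⟩)
      · exact absurd hF id
      · obtain ⟨hts, rfl⟩ := (hmemI t ct).mp hmt
        exact ⟨(hmemT t).mpr ⟨hts, by omega⟩, hpP, hpt, hle⟩
    · rintro ⟨ht, hp, hne, hle⟩
      obtain ⟨hts, h3⟩ := (hmemT t).mp ht
      exact Or.inr ⟨(List.count t array : Int), (hmemI t _).mpr ⟨hts, rfl⟩, by omega, hp, hne, hle⟩
  -- A: sorted lists order facts
  have hTbnd : ∀ x ∈ T, pvBnd x := fun x hx => hSmem x ((hmemT x).mp hx).1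
  have hPbnd : ∀ x ∈ P, pvBnd x := fun x hx => hSmem x ((hmemP x).mp hx).1
  have hTnd : T.Nodup := List.Nodup.filter _ (PySem.Set.nodup_ofList array)
  have hPnd : P.Nodup := List.Nodup.filter _ (PySem.Set.nodup_ofList array)
  have hpermT := PySem.List.sorted2_perm T (fun x : Int => if x ≠ 1 then (0 : Int) else 14) (fun x : Int => x) true
  have hpermP := PySem.List.sorted2_perm P (fun x : Int => if x ≠ 1 then (0 : Int) else 14) (fun x : Int => x) true
  have hTSbnd : ∀ x ∈ PySem.List.sorted2 T (fun x : Int => if x ≠ 1 then (0 : Int) else 14) (fun x : Int => x) true, pvBnd x :=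
    fun x hx => hTbnd x (hpermT.mem_iff.mp hx)
  have hPSbnd : ∀ x ∈ PySem.List.sorted2 P (fun x : Int => if x ≠ 1 then (0 : Int) else 14) (fun x : Int => x) true, pvBnd x :=
    fun x hx => hPbnd x (hpermP.mem_iff.mp hx)
  have hTSpw : (PySem.List.sorted2 T (fun x : Int => if x ≠ 1 then (0 : Int) else 14) (fun x : Int => x) true).Pairwise
      (fun a b => solutionAltRank b < solutionAltRank a) := by
    refine pairwise_strict_of_le _ (hpermT.nodup_iff.mpr hTnd) hTSbnd ?_
    rw [sorted2_rev_eq]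
    exact (foldl_insertBy_pairwise T [] hTbnd (by simp) (by simp)).1
  have hPSpw : (PySem.List.sorted2 P (fun x : Int => if x ≠ 1 then (0 : Int) else 14) (fun x : Int => x) true).Pairwise
      (fun a b => solutionAltRank b < solutionAltRank a) := by
    refine pairwise_strict_of_le _ (hpermP.nodup_iff.mpr hPnd) hPSbnd ?_
    rw [sorted2_rev_eq]
    exact (foldl_insertBy_pairwise P [] hPbnd (by simp) (by simp)).1
  by_cases hemp : T = [] ∨ P = []
  · rw [if_pos hemp]
    rcases hCB with ⟨hb, _⟩ | ⟨t, p, hb, hc, _⟩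
    · rw [hb]
    · exfalso
      rcases hemp with he | he
      · exact List.not_mem_nil (he ▸ hc.1)
      · exact List.not_mem_nil (he ▸ hc.2.1)
  · rw [if_neg hemp]
    cases hloop : solutionLoop mx
        (PySem.List.sorted2 P (fun x : Int => if x ≠ 1 then (0 : Int) else 14) (fun x : Int => x) true)
        (PySem.List.sorted2 T (fun x : Int => if x ≠ 1 then (0 : Int) else 14) (fun x : Int => x) true) with
    | none =>
      have hnone := (loopA_none mx _ _).mp hloop
      rcases hCB with ⟨hb, _⟩ | ⟨t, p, hb, hc, _⟩
      · rw [hb]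
      · exfalso
        have hts : t ∈ PySem.List.sorted2 T _ (fun x : Int => x) true := hpermT.mem_iff.mpr hc.1
        have hps : p ∈ PySem.List.sorted2 P _ (fun x : Int => x) true := hpermP.mem_iff.mpr hc.2.1
        rcases hnone t hts p hps with he | hgt
        · exact hc.2.2.1 he.symm
        · have := hc.2.2.2; omega
    | some r =>
      obtain ⟨t, p, hr, htm, hpm, hne, hle, hmax⟩ :=
        loopA_some mx _ _ r hTSpw hPSpw hTSbnd hPSbnd hloop
      rcases hCB with ⟨hb, hn⟩ | ⟨t0, p0, hb, hc0, hmax0⟩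
      · exfalso
        exact hn t p ⟨hpermT.mem_iff.mp htm, hpermP.mem_iff.mp hpm, fun he => hne he.symm, by omega⟩
      · rw [hb]
        have h1 : pvK t p ≤ pvK t0 p0 :=
          hmax0 t p ⟨hpermT.mem_iff.mp htm, hpermP.mem_iff.mp hpm, fun he => hne he.symm, by omega⟩
        have h2 : pvK t0 p0 ≤ pvK t p := by
          refine hmax t0 (hpermT.mem_iff.mpr hc0.1) p0 (hpermP.mem_iff.mpr hc0.2.1)
            (fun he => hc0.2.2.1 he.symm) ?_
          have := hc0.2.2.2; omega
        obtain ⟨rfl, rfl⟩ := pvK_inj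
          (hTbnd t (hpermT.mem_iff.mp htm)) (hPbnd p (hpermP.mem_iff.mp hpm))
          (hTbnd t0 hc0.1) (hPbnd p0 hc0.2.1) (le_antisymm h1 h2)
        simpa using hr
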